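-- pv_equiv track=rewrite | github.com/valthalion/aoc2020 | puzzle08.py | find_valid_addresses
-- ===== SOURCE A (Python) =====
-- from collections import defaultdict
--
-- def find_valid_addresses(program):
--     graph = {}
--     for idx, (cmd, arg) in enumerate(program):
--         if cmd in ('nop', 'acc'):
--             delta = 1
--         else:  # jmp
--             delta = arg
--         graph[idx] = idx + delta
--     inverse_graph = defaultdict(set)
--     for orig, dest in graph.items():
--         inverse_graph[dest].add(orig)
--     queue = set(inverse_graph[len(program)])
--     valid_addresses = set()
--     while queue:
--         address = queue.pop()
--         valid_addresses.add(address)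
--         queue |= inverse_graph[address] - valid_addresses
--     return valid_addresses
-- ===== SOURCE B (Python) =====
-- def find_valid_addresses(program):
--     # Fixpoint without any graph: repeatedly pick the lowest address whose
--     # single successor (idx+1 for nop/acc, idx+arg for jmp) is the program end
--     # or an already-valid address.
--     n = len(program)
--     succ = [idx + 1 if cmd in ('nop', 'acc') else idx + arg
--             for idx, (cmd, arg) in enumerate(program)]
--     valid = set()
--     while True:
--         nxt = next((i for i in range(n)
--                     if i not in valid and (succ[i] == n or succ[i] in valid)),
--                    None)
--         if nxt is None:
--             return valid
--         valid.add(nxt)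
-- ===== Notes on version B (the rewrite author's own statement) =====
-- stated objective: simpler
-- what changed: Replaces A's successor graph, inverse graph and end-to-start worklist propagation by a plain fixpoint loop that repeatedly scans for the lowest not-yet-valid address whose single successor is the program end or an already-valid address.
import Mathlib
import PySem

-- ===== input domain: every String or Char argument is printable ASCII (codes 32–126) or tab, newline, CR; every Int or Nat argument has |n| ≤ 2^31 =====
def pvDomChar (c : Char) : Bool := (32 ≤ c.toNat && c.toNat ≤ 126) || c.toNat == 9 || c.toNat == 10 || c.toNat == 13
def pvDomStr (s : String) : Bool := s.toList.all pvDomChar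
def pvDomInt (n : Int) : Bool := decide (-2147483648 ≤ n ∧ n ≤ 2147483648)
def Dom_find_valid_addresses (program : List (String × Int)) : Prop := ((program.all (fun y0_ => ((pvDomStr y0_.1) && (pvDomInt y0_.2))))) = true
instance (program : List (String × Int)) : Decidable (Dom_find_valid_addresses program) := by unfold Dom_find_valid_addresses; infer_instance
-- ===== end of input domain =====

-- B drops A's graph dict, inverse-graph dict and worklist, and instead repeatedly scans for
-- the lowest not-yet-valid address whose single successor is the program end or already valid
-- (objective: simpler; both return a Python set, so only its members are meaningful).

-- ===== PORT A =====
-- graph[idx] = idx + delta, built by insertion over enumerate(program)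
def fvaGraph (program : List (String × Int)) : PySem.Dict Int Int :=
  (PySem.List.enumerate program).foldl
    (fun g p =>
      let delta : Int := if p.2.1 == "nop" || p.2.1 == "acc" then 1 else p.2.2
      g.insert p.1 (p.1 + delta))
    PySem.Dict.empty

-- inverse_graph[dest].add(orig) over graph.items()  (defaultdict(set): absent key reads as [])
def fvaInv (program : List (String × Int)) : PySem.Dict Int (PySem.Set Int) :=
  (fvaGraph program).items.foldl
    (fun d p => d.modify p.2 [] (fun s => PySem.Set.add s p.1))
    PySem.Dict.empty

-- the while loop.  Python's set.pop() order is unspecified (hash order, which PySem does not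
-- model) and the returned SET does not depend on it; the port determinizes pop() as the
-- minimum element of the queue.  Each iteration moves one new address (all drawn from
-- 0..len(program)-1) into valid, so fuel = len(program) always reaches the empty queue.
def fvaLoopA (inv : PySem.Dict Int (PySem.Set Int)) :
    Nat → PySem.Set Int → PySem.Set Int → PySem.Set Int
  | 0, _queue, valid => valid
  | fuel+1, queue, valid =>
    match PySem.List.min? queue (fun x => x) with
    | none => valid
    | some address =>
        let valid' := PySem.Set.add valid address
        let queue' := PySem.Set.union (PySem.Set.discard queue address)
          (PySem.Set.diff (inv.getD address []) valid')
        fvaLoopA inv fuel queue' valid'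

def find_valid_addresses (program : List (String × Int)) : List Int :=
  let inv := fvaInv program
  let queue : PySem.Set Int := PySem.Set.ofList (inv.getD (program.length : Int) [])
  fvaLoopA inv program.length queue []

-- ===== PORT B =====
-- succ = [idx + 1 if cmd in ('nop', 'acc') else idx + arg for idx, (cmd, arg) in enumerate(program)]
def fvaSuccList (program : List (String × Int)) : List Int :=
  (PySem.List.enumerate program).map
    (fun p => if p.2.1 == "nop" || p.2.1 == "acc" then p.1 + 1 else p.1 + p.2.2)

-- while True: nxt = next((i for i in range(n) if ...), None); stop on None, else add.
-- fuel = n: each round adds one new address from 0..n-1, so the scan comes up empty within n rounds.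
def fvaLoopB (n : Int) (succ : List Int) :
    Nat → PySem.Set Int → PySem.Set Int
  | 0, valid => valid
  | fuel+1, valid =>
    match (PySem.List.pyRange 0 n 1).find?
        (fun i => !(PySem.Set.contains valid i) &&
          (PySem.List.pyGetD succ i 0 == n || PySem.Set.contains valid (PySem.List.pyGetD succ i 0))) with
    | none => valid
    | some i => fvaLoopB n succ fuel (PySem.Set.add valid i)

def find_valid_addresses_alt (program : List (String × Int)) : List Int :=
  fvaLoopB (program.length : Int) (fvaSuccList program) program.length []

-- ===== PRECONDITION & SPEC =====
def Spec_find_valid_addresses (program : List (String × Int)) (out : List Int) : Prop := out = find_valid_addresses_alt program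
instance (program : List (String × Int)) (out : List Int) : Decidable (Spec_find_valid_addresses program out) := by unfold Spec_find_valid_addresses; infer_instance

-- ===== CLAIM (what is proved, stated in full; the proofs are below) =====
def Claim_equal_find_valid_addresses : Prop := ∀ (program : List (String × Int)), Dom_find_valid_addresses program → Spec_find_valid_addresses program (find_valid_addresses program)

-- ===== LEMMAS AND PROOFS =====

-- the successor of address k, in the shape B computes it
def fvaS (program : List (String × Int)) (k : Nat) : Int :=
  match program[k]? with
  | some ca => if ca.1 == "nop" || ca.1 == "acc" then (k : Int) + 1 else (k : Int) + ca.2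
  | none => 0

theorem length_fvaSuccList (program : List (String × Int)) :
    (fvaSuccList program).length = program.length := by
  simp [fvaSuccList, PySem.List.length_enumerate]

theorem getElem?_fvaSuccList (program : List (String × Int)) (k : Nat) (hk : k < program.length) :
    (fvaSuccList program)[k]? = some (fvaS program k) := by
  simp [fvaSuccList, PySem.List.getElem?_enumerate, fvaS, List.getElem?_eq_getElem hk]

theorem items_fvaGraph (program : List (String × Int)) :
    (fvaGraph program).items = (PySem.List.enumerate program).map
      (fun p => (p.1, p.1 + if p.2.1 == "nop" || p.2.1 == "acc" then 1 else p.2.2)) := by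
  unfold fvaGraph
  show ((PySem.List.enumerate program).foldl
      (fun g p => g.insert p.1 (p.1 + if p.2.1 == "nop" || p.2.1 == "acc" then 1 else p.2.2))
      PySem.Dict.empty).items = _
  rw [PySem.Dict.items_foldl_insert_fresh]
  · simp [PySem.Dict.empty]
  · intro a _; simp [PySem.Dict.contains_empty]
  · rw [PySem.List.map_fst_enumerate]; exact PySem.List.nodup_pyRange_one 0 _

theorem mem_getD_invfold (l : List (Int × Int)) :
    ∀ (d : PySem.Dict Int (PySem.Set Int)) (c x : Int),
      x ∈ (l.foldl (fun d p => d.modify p.2 [] (fun s => PySem.Set.add s p.1)) d).getD c []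
        ↔ x ∈ d.getD c [] ∨ (x, c) ∈ l := by
  induction l with
  | nil => simp
  | cons p l ih =>
    intro d c x
    rw [List.foldl_cons, ih, PySem.Dict.getD_modify]
    by_cases hc : c = p.2
    · simp [hc, PySem.Set.mem_add, Prod.ext_iff]; tauto
    · simp [hc, Prod.ext_iff]

theorem mem_getD_fvaInv (program : List (String × Int)) (c x : Int) :
    x ∈ (fvaInv program).getD c [] ↔
      ∃ k : Nat, k < program.length ∧ x = (k : Int) ∧ fvaS program k = c := by
  unfold fvaInv
  rw [mem_getD_invfold, items_fvaGraph]
  simp only [PySem.Dict.getD_empty, List.not_mem_nil, false_or, List.mem_map,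
    PySem.List.mem_enumerate_iff]
  constructor
  · rintro ⟨p, ⟨k, hk, rfl⟩, hpx⟩
    refine ⟨k, hk, ?_, ?_⟩
    · simpa using congrArg Prod.fst hpx.symm
    · have := congrArg Prod.snd hpx
      simp only [fvaS, List.getElem?_eq_getElem hk] at *
      split at this <;> simp_all
  · rintro ⟨k, hk, rfl, hs⟩
    refine ⟨(0 + (k : Int), program[k]), ⟨k, hk, rfl⟩, ?_⟩
    simp only [fvaS, List.getElem?_eq_getElem hk] at hs
    split at hs <;> simp_all

-- find? over range(a, b) returns the least element satisfying p
theorem find?_pyRange_some (p : Int → Bool) (b m : Int) :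
    ∀ (k : Nat) (a : Int), (m - a).toNat = k → a ≤ m → m < b → p m = true →
      (∀ j, a ≤ j → j < m → p j = false) →
      (PySem.List.pyRange a b 1).find? p = some m := by
  intro k
  induction k with
  | zero =>
    intro a hk ham hmb hpm _
    have : a = m := by omega
    subst this
    rw [PySem.List.pyRange_one_cons (by omega)]
    simp [hpm]
  | succ k ih =>
    intro a hk ham hmb hpm hlow
    have ha : a < m := by omega
    rw [PySem.List.pyRange_one_cons (by omega)]
    rw [List.find?_cons, hlow a le_rfl ha]
    exact ih (a + 1) (by omega) (by omega) hmb hpm (fun j hj1 hj2 => hlow j (by omega) hj2)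

theorem fva_loop_eq (program : List (String × Int)) :
    ∀ (fuel : Nat) (queue valid : PySem.Set Int),
      (∀ x : Int, x ∈ queue ↔
        ((∃ k : Nat, k < program.length ∧ x = (k : Int) ∧
            (fvaS program k = (program.length : Int) ∨ fvaS program k ∈ valid)) ∧ x ∉ valid)) →
      fvaLoopA (fvaInv program) fuel queue valid
        = fvaLoopB (program.length : Int) (fvaSuccList program) fuel valid := by
  intro fuel
  induction fuel with
  | zero => intro queue valid _; rfl
  | succ fuel ih =>
    intro queue valid hq
    have hgetD : ∀ (k : Nat), k < program.length →
        PySem.List.pyGetD (fvaSuccList program) (k : Int) 0 = fvaS program k := by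
      intro k hk
      rw [PySem.List.pyGetD_natCast]
      have hlt : k < (fvaSuccList program).length := by rw [length_fvaSuccList]; exact hk
      rw [List.getD_eq_getElem?_getD, getElem?_fvaSuccList program k hk]; rfl
    -- the Bool scan predicate of B, in Prop form, at a range element
    have hpred : ∀ (j : Int), 0 ≤ j → j < (program.length : Int) →
        ((!(PySem.Set.contains valid j) &&
          (PySem.List.pyGetD (fvaSuccList program) j 0 == (program.length : Int) ||
           PySem.Set.contains valid (PySem.List.pyGetD (fvaSuccList program) j 0))) = true
         ↔ j ∈ queue) := by
      intro j hj0 hjn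
      have hk : j.toNat < program.length := by omega
      have hj : j = ((j.toNat : Nat) : Int) := by omega
      rw [hj, hgetD j.toNat hk]
      rw [hq]
      simp only [Bool.and_eq_true, Bool.not_eq_true', Bool.or_eq_true, beq_iff_eq,
        PySem.Set.contains_eq_listContains, List.contains_eq_mem, decide_eq_true_eq,
        decide_eq_false_iff_not]
      constructor
      · rintro ⟨hnv, hc⟩
        exact ⟨⟨j.toNat, hk, rfl, hc⟩, hnv⟩
      · rintro ⟨⟨k, _, hxk, hc⟩, hnv⟩
        have : k = j.toNat := by omega
        subst this
        exact ⟨hnv, hc⟩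
    rw [show fvaLoopA (fvaInv program) (fuel+1) queue valid =
          (match PySem.List.min? queue (fun x => x) with
           | none => valid
           | some address =>
               fvaLoopA (fvaInv program) fuel
                 (PySem.Set.union (PySem.Set.discard queue address)
                   (PySem.Set.diff ((fvaInv program).getD address []) (PySem.Set.add valid address)))
                 (PySem.Set.add valid address)) from rfl]
    rw [show fvaLoopB (program.length : Int) (fvaSuccList program) (fuel+1) valid =
          (match (PySem.List.pyRange 0 (program.length : Int) 1).find?
              (fun i => !(PySem.Set.contains valid i) &&
                (PySem.List.pyGetD (fvaSuccList program) i 0 == (program.length : Int) ||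
                 PySem.Set.contains valid (PySem.List.pyGetD (fvaSuccList program) i 0))) with
           | none => valid
           | some i => fvaLoopB (program.length : Int) (fvaSuccList program) fuel
               (PySem.Set.add valid i)) from rfl]
    cases hmin : PySem.List.min? queue (fun x => x) with
    | none =>
      have hqe : queue = [] := (PySem.List.min?_eq_none_iff _ _).mp hmin
      have hfind : (PySem.List.pyRange 0 (program.length : Int) 1).find?
          (fun i => !(PySem.Set.contains valid i) &&
            (PySem.List.pyGetD (fvaSuccList program) i 0 == (program.length : Int) ||
             PySem.Set.contains valid (PySem.List.pyGetD (fvaSuccList program) i 0))) = none := by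
        rw [List.find?_eq_none]
        intro j hjr
        have hjb := PySem.List.mem_pyRange_one.mp hjr
        intro hp
        have := (hpred j hjb.1 hjb.2).mp hp
        rw [hqe] at this
        simp at this
      rw [hfind]
    | some m =>
      have hmem : m ∈ queue := PySem.List.min?_mem hmin
      have hlb : ∀ y ∈ queue, m ≤ y := by
        intro y hy; exact PySem.List.min?_isMin hmin y hy
      obtain ⟨⟨km, hkm, hxkm, _⟩, hmnv⟩ := (hq m).mp hmem
      have hm0 : (0:Int) ≤ m := by omega
      have hmn : m < (program.length : Int) := by omega
      have hfind : (PySem.List.pyRange 0 (program.length : Int) 1).find?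
          (fun i => !(PySem.Set.contains valid i) &&
            (PySem.List.pyGetD (fvaSuccList program) i 0 == (program.length : Int) ||
             PySem.Set.contains valid (PySem.List.pyGetD (fvaSuccList program) i 0))) = some m := by
        apply find?_pyRange_some _ _ m (m - 0).toNat 0 rfl hm0 hmn
        · exact (hpred m hm0 hmn).mpr hmem
        · intro j hj0 hjm
          by_contra hnp
          rw [Bool.not_eq_false] at hnp
          have hjq := (hpred j hj0 (lt_trans hjm hmn)).mp hnp
          have := hlb j hjq
          omega
      rw [hfind]
      apply ih
      -- re-establish the queue invariant for the new state
      intro x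
      simp only [PySem.Set.mem_union, PySem.Set.mem_discard, PySem.Set.mem_diff,
        PySem.Set.mem_add, mem_getD_fvaInv]
      constructor
      · rintro (⟨hxq, hxm⟩ | ⟨⟨k, hk, hxk, hsk⟩, hnv'⟩)
        · obtain ⟨⟨k, hk, hxk, hc⟩, hnv⟩ := (hq x).mp hxq
          refine ⟨⟨k, hk, hxk, ?_⟩, ?_⟩
          · rcases hc with h | h
            · exact Or.inl h
            · exact Or.inr (Or.inl h)
          · rintro (h | h)
            · exact hnv h
            · exact hxm h
        · exact ⟨⟨k, hk, hxk, Or.inr (Or.inr hsk)⟩, hnv'⟩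
      · rintro ⟨⟨k, hk, hxk, hc⟩, hnv'⟩
        have hxnv : x ∉ valid := fun h => hnv' (Or.inl h)
        have hxm : x ≠ m := fun h => hnv' (Or.inr h)
        rcases hc with h | h | h
        · exact Or.inl ⟨(hq x).mpr ⟨⟨k, hk, hxk, Or.inl h⟩, hxnv⟩, hxm⟩
        · exact Or.inl ⟨(hq x).mpr ⟨⟨k, hk, hxk, Or.inr h⟩, hxnv⟩, hxm⟩
        · exact Or.inr ⟨⟨k, hk, hxk, h⟩, hnv'⟩

-- ===== VERDICT (by name: the statement is the Claim_ definition above) =====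
theorem find_valid_addresses_spec : Claim_equal_find_valid_addresses := by
  intro program _
  unfold Spec_find_valid_addresses find_valid_addresses find_valid_addresses_alt
  apply fva_loop_eq
  intro x
  simp only [PySem.Set.mem_ofList, mem_getD_fvaInv, List.not_mem_nil, or_false, and_true,
    not_false_iff]
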